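-- pv_equiv track=rewrite | github.com/x746b/command-vault | src/command_vault/security.py | should_skip_command
-- ===== SOURCE A (Python) =====
-- def should_skip_command(command: str) -> bool:
--     """
--     Check if a command should be skipped entirely.
--
--     Args:
--         command: The command string
--
--     Returns:
--         True if command should not be indexed
--     """
--     command_lower = command.lower().strip()
--
--     # Skip flag retrieval commands
--     skip_commands = [
--         'cat user.txt',
--         'cat root.txt',
--         'type user.txt',
--         'type root.txt',
--         'get-content user.txt',
--         'get-content root.txt',
--     ]
--
--     for skip_cmd in skip_commands:
--         if skip_cmd in command_lower:
--             return True
--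
--     return False
-- ===== SOURCE B (Python) =====
-- def should_skip_command(command: str) -> bool:
--     """Single scan anchored on the flag file names: at each position, if the
--     text continues with user.txt/root.txt and the text before it ends with a
--     read verb, the command is a flag-retrieval command."""
--     s = command.lower().strip()
--     for j in range(len(s)):
--         if (s.startswith("user.txt", j) or s.startswith("root.txt", j)) and \
--            (s.endswith("cat ", 0, j) or s.endswith("type ", 0, j) or s.endswith("get-content ", 0, j)):
--             return True
--     return False
-- ===== Notes on version B (the rewrite author's own statement) =====
-- stated objective: alternative
-- what changed: Replaced the six-pattern substring-membership loop by a single positional scan anchored on the file names user.txt/root.txt, checking that the preceding text ends with one of the read verbs.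
import Mathlib
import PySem

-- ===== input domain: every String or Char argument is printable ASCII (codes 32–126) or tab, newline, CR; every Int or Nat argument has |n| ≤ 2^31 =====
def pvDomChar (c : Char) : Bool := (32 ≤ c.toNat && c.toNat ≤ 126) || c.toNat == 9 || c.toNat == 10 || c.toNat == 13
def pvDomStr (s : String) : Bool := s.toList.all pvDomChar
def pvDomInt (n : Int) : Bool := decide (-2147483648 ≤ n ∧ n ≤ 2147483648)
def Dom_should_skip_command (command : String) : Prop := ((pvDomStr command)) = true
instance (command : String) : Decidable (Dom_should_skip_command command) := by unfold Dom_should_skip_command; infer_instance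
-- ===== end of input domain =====

-- B replaces A's six-pattern substring-membership loop with one positional scan
-- anchored on the file names (alternative decomposition, same cost class).


-- ===== PORT A =====
def should_skip_command (command : String) : Bool :=
  let command_lower := PySem.Str.strip (PySem.Str.lower command)
  let skip_commands : List String :=
    ["cat user.txt", "cat root.txt", "type user.txt", "type root.txt",
     "get-content user.txt", "get-content root.txt"]
  skip_commands.any (fun skip_cmd => PySem.Str.isIn skip_cmd command_lower)

-- ===== PORT B =====
def should_skip_command_alt (command : String) : Bool :=
  let s := (PySem.Str.strip (PySem.Str.lower command)).toList
  (List.range s.length).any (fun j =>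
    (PySem.Chars.startswith (s.drop j) "user.txt".toList
      || PySem.Chars.startswith (s.drop j) "root.txt".toList)
    && (PySem.Chars.endswith (s.take j) "cat ".toList
      || PySem.Chars.endswith (s.take j) "type ".toList
      || PySem.Chars.endswith (s.take j) "get-content ".toList))

-- ===== PRECONDITION & SPEC =====
def Spec_should_skip_command (command : String) (out : Bool) : Prop := out = should_skip_command_alt command
instance (command : String) (out : Bool) : Decidable (Spec_should_skip_command command out) := by unfold Spec_should_skip_command; infer_instance

-- ===== CLAIM (what is proved, stated in full; the proofs are below) =====
def Claim_equal_should_skip_command : Prop := ∀ (command : String), Dom_should_skip_command command → Spec_should_skip_command command (should_skip_command command)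

-- ===== LEMMAS AND PROOFS =====

/-- An appended pattern `v ++ u` (with `u` nonempty) is an infix of `c` iff at some
    position `j < c.length` the remainder starts with `u` and the prefix ends with `v`. -/
lemma infix_append_iff {α : Type} (v u c : List α) (hu : u ≠ []) :
    (v ++ u) <:+: c ↔ ∃ j < c.length, u <+: c.drop j ∧ v <:+ c.take j := by
  constructor
  · rintro ⟨p, q, rfl⟩
    refine ⟨p.length + v.length, ?_, ?_, ?_⟩
    · have : 0 < u.length := List.length_pos_iff.2 hu
      simp [List.length_append]; omega
    · have h : p ++ (v ++ u) ++ q = (p ++ v) ++ (u ++ q) := by simp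
      rw [h]
      have hd := List.drop_left (l₁ := p ++ v) (l₂ := u ++ q)
      simp only [List.length_append] at hd
      rw [hd]
      exact ⟨q, rfl⟩
    · have h : p ++ (v ++ u) ++ q = (p ++ v) ++ (u ++ q) := by simp
      rw [h]
      have ht := List.take_left (l₁ := p ++ v) (l₂ := u ++ q)
      simp only [List.length_append] at ht ⊢
      rw [ht]
      exact ⟨p, rfl⟩
  · rintro ⟨j, hj, ⟨t, ht⟩, ⟨w, hw⟩⟩
    refine ⟨w, t, ?_⟩
    have hc : c = c.take j ++ c.drop j := (List.take_append_drop j c).symm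
    rw [hc, ← hw, ← ht]
    simp

lemma key (c : List Char) :
    (["cat user.txt", "cat root.txt", "type user.txt", "type root.txt",
      "get-content user.txt", "get-content root.txt"].any
        (fun skip_cmd => PySem.Chars.isIn skip_cmd.toList c)) =
    ((List.range c.length).any (fun j =>
      (PySem.Chars.startswith (c.drop j) "user.txt".toList
        || PySem.Chars.startswith (c.drop j) "root.txt".toList)
      && (PySem.Chars.endswith (c.take j) "cat ".toList
        || PySem.Chars.endswith (c.take j) "type ".toList
        || PySem.Chars.endswith (c.take j) "get-content ".toList))) := by
  rw [Bool.eq_iff_iff]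
  simp only [List.any_cons, List.any_nil, List.any_eq_true, List.mem_range,
    Bool.or_eq_true, Bool.and_eq_true,
    PySem.Chars.isIn_iff_infix, PySem.Chars.startswith_iff, PySem.Chars.endswith_iff]
  have e1 : ("cat user.txt".toList : List Char) = "cat ".toList ++ "user.txt".toList := by decide
  have e2 : ("cat root.txt".toList : List Char) = "cat ".toList ++ "root.txt".toList := by decide
  have e3 : ("type user.txt".toList : List Char) = "type ".toList ++ "user.txt".toList := by decide
  have e4 : ("type root.txt".toList : List Char) = "type ".toList ++ "root.txt".toList := by decide
  have e5 : ("get-content user.txt".toList : List Char) = "get-content ".toList ++ "user.txt".toList := by decide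
  have e6 : ("get-content root.txt".toList : List Char) = "get-content ".toList ++ "root.txt".toList := by decide
  rw [e1, e2, e3, e4, e5, e6]
  rw [infix_append_iff _ _ c (by decide), infix_append_iff _ _ c (by decide),
      infix_append_iff _ _ c (by decide), infix_append_iff _ _ c (by decide),
      infix_append_iff _ _ c (by decide), infix_append_iff _ _ c (by decide)]
  constructor
  · rintro (⟨j, hj, hu, hv⟩ | ⟨j, hj, hu, hv⟩ | ⟨j, hj, hu, hv⟩ | ⟨j, hj, hu, hv⟩ |
            ⟨j, hj, hu, hv⟩ | ⟨j, hj, hu, hv⟩ | h)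
    · exact ⟨j, hj, Or.inl hu, Or.inl (Or.inl hv)⟩
    · exact ⟨j, hj, Or.inr hu, Or.inl (Or.inl hv)⟩
    · exact ⟨j, hj, Or.inl hu, Or.inl (Or.inr hv)⟩
    · exact ⟨j, hj, Or.inr hu, Or.inl (Or.inr hv)⟩
    · exact ⟨j, hj, Or.inl hu, Or.inr hv⟩
    · exact ⟨j, hj, Or.inr hu, Or.inr hv⟩
    · exact absurd h (by simp)
  · rintro ⟨j, hj, hu | hu, (hv | hv) | hv⟩
    · exact Or.inl ⟨j, hj, hu, hv⟩
    · exact Or.inr (Or.inr (Or.inl ⟨j, hj, hu, hv⟩))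
    · exact Or.inr (Or.inr (Or.inr (Or.inr (Or.inl ⟨j, hj, hu, hv⟩))))
    · exact Or.inr (Or.inl ⟨j, hj, hu, hv⟩)
    · exact Or.inr (Or.inr (Or.inr (Or.inl ⟨j, hj, hu, hv⟩)))
    · exact Or.inr (Or.inr (Or.inr (Or.inr (Or.inr (Or.inl ⟨j, hj, hu, hv⟩)))))

-- ===== VERDICT (by name: the statement is the Claim_ definition above) =====
theorem should_skip_command_spec : Claim_equal_should_skip_command := by
  intro command _
  unfold Spec_should_skip_command should_skip_command should_skip_command_alt
  simp only [PySem.Str.isIn_eq]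
  exact key ((PySem.Str.strip (PySem.Str.lower command)).toList)
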